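-- pv_equiv track=rewrite | github.com/ps258/tyk-scripts | tickets/fixSyncNotUnique.py | getNewListenPath
-- ===== SOURCE A (Python) =====
-- def getNewListenPath(listenPath, allListenPaths):
--     if listenPath in allListenPaths:
--         i = 1
--         while listenPath+str(i) in allListenPaths:
--             i += 1
--         newListenPath = listenPath+str(i)
--         allListenPaths[newListenPath] = 1
--         return newListenPath
--     allListenPaths[listenPath] = 1
--     return listenPath
-- ===== SOURCE B (Python) =====
-- def _suffix_index(suf):
--     """Return n >= 1 if suf is the canonical decimal form str(n), else None."""
--     if not suf or suf[0] == '0':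
--         return None
--     n = 0
--     for ch in suf:
--         if not ('0' <= ch <= '9'):
--             return None
--         n = n * 10 + (ord(ch) - 48)
--     return n
--
--
-- def getNewListenPath(listenPath, allListenPaths):
--     # One pass over the existing keys: collect the set of candidate indices
--     # already taken (0 = the bare path, n >= 1 = path + str(n)), then take
--     # the smallest free index.  No repeated probing of the dict.
--     taken = set()
--     L = len(listenPath)
--     for key in allListenPaths:
--         if key.startswith(listenPath):
--             suf = key[L:]
--             if suf == "":
--                 taken.add(0)
--             else:
--                 n = _suffix_index(suf)
--                 if n is not None:
--                     taken.add(n)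
--     n = 0
--     while n in taken:
--         n += 1
--     newListenPath = listenPath if n == 0 else listenPath + str(n)
--     allListenPaths[newListenPath] = 1
--     return newListenPath
-- ===== Notes on version B (the rewrite author's own statement) =====
-- stated objective: alternative
-- what changed: Instead of probing candidate names (bare path, path+'1', path+'2', ...) against the dict one by one, B makes a single pass over the existing keys, parses each key's suffix after the listenPath prefix as a canonical decimal index into a set of taken indices, and returns the candidate at the smallest free index (a mex computation).
import Mathlib
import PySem

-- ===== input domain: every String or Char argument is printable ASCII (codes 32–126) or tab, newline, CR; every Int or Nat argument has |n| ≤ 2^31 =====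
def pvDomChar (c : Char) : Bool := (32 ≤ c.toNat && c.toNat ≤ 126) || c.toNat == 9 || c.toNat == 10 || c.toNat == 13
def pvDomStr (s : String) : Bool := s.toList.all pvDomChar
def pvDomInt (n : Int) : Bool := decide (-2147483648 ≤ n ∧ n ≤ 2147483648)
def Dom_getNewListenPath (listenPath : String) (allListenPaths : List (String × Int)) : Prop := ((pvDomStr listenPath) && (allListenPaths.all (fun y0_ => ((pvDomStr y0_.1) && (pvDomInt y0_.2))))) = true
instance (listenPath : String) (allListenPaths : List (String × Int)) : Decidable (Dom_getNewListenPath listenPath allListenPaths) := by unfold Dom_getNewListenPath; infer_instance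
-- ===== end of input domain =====

-- B inverts A's candidate probing: one pass over the existing keys parses each matching
-- suffix into a set of taken indices, then the smallest free index is returned (objective:
-- alternative). Equivalence is about the RETURN value; both Pythons also insert the
-- returned key (with value 1) into the dict.

-- ===== PORT A =====
-- 'x in dict' tests key membership
def pvMemKey (allListenPaths : List (String × Int)) (s : String) : Bool :=
  allListenPaths.any (fun p => p.1 == s)

-- the while-loop of A; fuel only makes the recursion total (allListenPaths.length + 1
-- distinct candidates cannot all be among ≤ allListenPaths.length keys, so fuel never runs out)
def pvLoopA (listenPath : String) (allListenPaths : List (String × Int)) (i : Nat) : Nat → String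
  | 0 => listenPath ++ PySem.Int.toStr i
  | fuel + 1 =>
    if pvMemKey allListenPaths (listenPath ++ PySem.Int.toStr i) then
      pvLoopA listenPath allListenPaths (i + 1) fuel
    else
      listenPath ++ PySem.Int.toStr i

def getNewListenPath (listenPath : String) (allListenPaths : List (String × Int)) : String :=
  if pvMemKey allListenPaths listenPath then
    pvLoopA listenPath allListenPaths 1 (allListenPaths.length + 1)
  else
    listenPath

-- ===== PORT B =====
-- Source B's _suffix_index: suf parsed as the canonical decimal str(n), n ≥ 1, else None.
-- Python's "'0' <= ch <= '9'" compares code points: exactly 48 ≤ ch.toNat ≤ 57 on ASCII;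
-- ord(ch) - 48 is ch.toNat - 48.
def pvParseLoop (suf : List Char) (n : Nat) : Option Nat :=
  match suf with
  | [] => some n
  | c :: cs => if 48 ≤ c.toNat ∧ c.toNat ≤ 57 then pvParseLoop cs (n * 10 + (c.toNat - 48)) else none

def pvSuffixIndex (suf : List Char) : Option Nat :=
  match suf with
  | [] => none
  | c :: _ => if c = '0' then none else pvParseLoop suf 0

-- loop body of Source B's single pass: key[L:] is toList.drop L (exact: L = len(listenPath) ≥ 0)
def pvAddKey (listenPath : String) (s : PySem.Set Nat) (key : String) : PySem.Set Nat :=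
  if PySem.Str.startswith key listenPath then
    let suf := key.toList.drop listenPath.toList.length
    if suf = [] then PySem.Set.add s 0
    else
      match pvSuffixIndex suf with
      | some n => PySem.Set.add s n
      | none => s
  else s

-- Source B's 'while n in taken: n += 1'; fuel only for totality (taken holds at most
-- allListenPaths.length indices, so the loop stops within length + 2 steps)
def pvMex (taken : PySem.Set Nat) (n : Nat) : Nat → Nat
  | 0 => n
  | fuel + 1 => if PySem.Set.contains taken n then pvMex taken (n + 1) fuel else n

def getNewListenPath_alt (listenPath : String) (allListenPaths : List (String × Int)) : String :=
  let taken := allListenPaths.foldl (fun s kv => pvAddKey listenPath s kv.1) PySem.Set.empty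
  let n := pvMex taken 0 (allListenPaths.length + 2)
  if n = 0 then listenPath else listenPath ++ PySem.Int.toStr n

-- ===== PRECONDITION & SPEC =====
def Spec_getNewListenPath (listenPath : String) (allListenPaths : List (String × Int)) (out : String) : Prop := out = getNewListenPath_alt listenPath allListenPaths
instance (listenPath : String) (allListenPaths : List (String × Int)) (out : String) : Decidable (Spec_getNewListenPath listenPath allListenPaths out) := by unfold Spec_getNewListenPath; infer_instance

-- ===== CLAIM (what is proved, stated in full; the proofs are below) =====
def Claim_equal_getNewListenPath : Prop := ∀ (listenPath : String) (allListenPaths : List (String × Int)), Dom_getNewListenPath listenPath allListenPaths → Spec_getNewListenPath listenPath allListenPaths (getNewListenPath listenPath allListenPaths)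

-- ===== LEMMAS AND PROOFS =====

-- candidate n: the bare path for n = 0, path ++ str(n) for n ≥ 1
def pvCand (listenPath : String) (n : Nat) : String :=
  if n = 0 then listenPath else listenPath ++ PySem.Int.toStr n

-- the set built by B's first pass
def pvTaken (listenPath : String) (allListenPaths : List (String × Int)) : PySem.Set Nat :=
  allListenPaths.foldl (fun s kv => pvAddKey listenPath s kv.1) PySem.Set.empty

-- the canonical decimal digit list of m (no sign, no leading zero except for m = 0)
def pvDigs (m : Nat) : List Char :=
  if m < 10 then [Nat.digitChar m]
  else pvDigs (m / 10) ++ [Nat.digitChar (m % 10)]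
decreasing_by exact Nat.div_lt_self (by omega) (by omega)

def pvDigitsOnly (cs : List Char) : Prop := ∀ c ∈ cs, 48 ≤ c.toNat ∧ c.toNat ≤ 57

def pvVal (cs : List Char) (a : Nat) : Nat :=
  cs.foldl (fun b c => b * 10 + (c.toNat - 48)) a

theorem pvDigitChar_toNat (d : Nat) (h : d < 10) : (Nat.digitChar d).toNat = 48 + d := by
  interval_cases d <;> decide

theorem pvDigitChar_of_toNat (c : Char) (h1 : 48 ≤ c.toNat) (h2 : c.toNat ≤ 57) :
    Nat.digitChar (c.toNat - 48) = c := by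
  obtain ⟨k, hk1, hk2, hk⟩ : ∃ k, 48 ≤ k ∧ k ≤ 57 ∧ Char.ofNat k = c :=
    ⟨c.toNat, h1, h2, Char.ofNat_toNat c⟩
  subst hk
  interval_cases k <;> decide

theorem pvToDigitsCore_eq : ∀ (f n : Nat) (ds : List Char), n < f →
    Nat.toDigitsCore 10 f n ds = pvDigs n ++ ds := by
  intro f
  induction f with
  | zero => intro n ds h; omega
  | succ f ih =>
    intro n ds h
    rw [Nat.toDigitsCore]
    by_cases h10 : n < 10
    · have hz : n / 10 = 0 := Nat.div_eq_of_lt h10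
      rw [if_pos hz, pvDigs, if_pos h10, Nat.mod_eq_of_lt h10]
      rfl
    · have hz : ¬ n / 10 = 0 := by
        intro hc
        have := Nat.lt_of_div_eq_zero (by omega) hc
        omega
      rw [if_neg hz]
      rw [ih (n / 10) _ (by
        have : n / 10 < n := Nat.div_lt_self (by omega) (by omega)
        omega)]
      conv_rhs => rw [pvDigs]
      rw [if_neg h10, List.append_assoc]
      rfl

theorem pvToDigits_eq (m : Nat) : Nat.toDigits 10 m = pvDigs m := by
  have := pvToDigitsCore_eq (m + 1) m [] (by omega)
  simpa [Nat.toDigits] using this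

theorem pvToChars_natCast (n : Nat) : PySem.Int.toChars (n : Int) = pvDigs n := by
  simp [PySem.Int.toChars, pvToDigits_eq]

theorem pvParseLoop_append (xs ys : List Char) :
    ∀ a, pvParseLoop (xs ++ ys) a = (pvParseLoop xs a).bind (pvParseLoop ys) := by
  induction xs with
  | nil => intro a; simp [pvParseLoop]
  | cons c cs ih =>
    intro a
    simp only [List.cons_append, pvParseLoop]
    split
    · exact ih _
    · rfl

theorem pvParseLoop_digs (m : Nat) : ∀ a,
    pvParseLoop (pvDigs m) a = some (a * 10 ^ (pvDigs m).length + m) := by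
  induction m using Nat.strong_induction_on with
  | _ m ih =>
    intro a
    by_cases h : m < 10
    · rw [pvDigs, if_pos h]
      have ht := pvDigitChar_toNat m h
      simp only [pvParseLoop, ht]
      rw [if_pos (by omega)]
      simp only [List.length_singleton, pow_one]
      congr 1
      omega
    · rw [pvDigs, if_neg h]
      have hlt : m / 10 < m := Nat.div_lt_self (by omega) (by omega)
      rw [pvParseLoop_append, ih (m / 10) hlt a]
      have ht := pvDigitChar_toNat (m % 10) (Nat.mod_lt m (by omega))
      simp only [Option.bind_some, pvParseLoop, ht]
      rw [if_pos (by omega)]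
      simp only [List.length_append, List.length_singleton]
      congr 1
      rw [pow_succ, ← mul_assoc]
      have hd : (48 + m % 10) - 48 = m % 10 := by omega
      rw [hd]
      generalize a * 10 ^ (pvDigs (m / 10)).length = b
      omega

theorem pvDigs_head (m : Nat) (hm : 1 ≤ m) : ∃ c cs, pvDigs m = c :: cs ∧ c ≠ '0' := by
  induction m using Nat.strong_induction_on with
  | _ m ih =>
    by_cases h : m < 10
    · refine ⟨Nat.digitChar m, [], by rw [pvDigs, if_pos h], ?_⟩
      interval_cases m <;> decide
    · have hlt : m / 10 < m := Nat.div_lt_self (by omega) (by omega)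
      obtain ⟨c, cs, hcs, hc⟩ := ih (m / 10) hlt (by omega)
      exact ⟨c, cs ++ [Nat.digitChar (m % 10)], by rw [pvDigs, if_neg h, hcs]; rfl, hc⟩

theorem pvSuffixIndex_digs (m : Nat) (hm : 1 ≤ m) : pvSuffixIndex (pvDigs m) = some m := by
  obtain ⟨c, cs, hcs, hc⟩ := pvDigs_head m hm
  rw [hcs]
  show (if c = '0' then none else pvParseLoop (c :: cs) 0) = some m
  rw [if_neg hc, ← hcs, pvParseLoop_digs]
  simp

theorem pvParseLoop_some : ∀ (cs : List Char) (a n : Nat), pvParseLoop cs a = some n →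
    pvDigitsOnly cs ∧ n = pvVal cs a := by
  intro cs
  induction cs with
  | nil =>
    intro a n h
    simp only [pvParseLoop, Option.some_inj] at h
    exact ⟨by simp [pvDigitsOnly], h.symm⟩
  | cons c cs ih =>
    intro a n h
    simp only [pvParseLoop] at h
    split at h
    next hdigc =>
      obtain ⟨hdig, hval⟩ := ih _ _ h
      refine ⟨?_, hval⟩
      intro x hx
      rw [List.mem_cons] at hx
      rcases hx with rfl | hx
      · exact hdigc
      · exact hdig x hx
    next => cases h

theorem pvVal_append (xs ys : List Char) (a : Nat) :
    pvVal (xs ++ ys) a = pvVal ys (pvVal xs a) := by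
  simp [pvVal, List.foldl_append]

theorem pvChar_ne_zero_toNat (c : Char) (h1 : 48 ≤ c.toNat) (hc : c ≠ '0') : 49 ≤ c.toNat := by
  rcases Nat.lt_or_ge c.toNat 49 with h | h
  · exfalso
    apply hc
    have : c.toNat = 48 := by omega
    rw [← Char.ofNat_toNat c, this]
  · exact h

theorem pvDigs_val : ∀ (cs' : List Char) (c : Char), pvDigitsOnly (c :: cs') → c ≠ '0' →
    pvDigs (pvVal (c :: cs') 0) = c :: cs' ∧ 1 ≤ pvVal (c :: cs') 0 := by
  intro cs'
  induction cs' using List.reverseRecOn with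
  | nil =>
    intro c hdig hc
    obtain ⟨h1, h2⟩ := hdig c (List.mem_cons_self ..)
    have h49 := pvChar_ne_zero_toNat c h1 hc
    have hv : pvVal [c] 0 = c.toNat - 48 := by simp [pvVal]
    rw [hv]
    constructor
    · rw [pvDigs, if_pos (by omega)]
      rw [pvDigitChar_of_toNat c h1 h2]
    · omega
  | append_singleton ds e ih =>
    intro c hdig hc
    have hde : pvDigitsOnly (c :: ds) := by
      intro x hx
      apply hdig
      rw [List.mem_cons] at hx ⊢
      rcases hx with rfl | hx
      · exact Or.inl rfl
      · exact Or.inr (List.mem_append_left _ hx)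
    have hee : 48 ≤ e.toNat ∧ e.toNat ≤ 57 :=
      hdig e (List.mem_cons_of_mem _ (List.mem_append_right _ (by simp)))
    obtain ⟨hds, hge⟩ := ih c hde hc
    have hsplit : (c :: (ds ++ [e])) = (c :: ds) ++ [e] := by simp
    rw [hsplit, pvVal_append]
    set v' := pvVal (c :: ds) 0 with hv'
    have hve : pvVal [e] v' = v' * 10 + (e.toNat - 48) := by simp [pvVal]
    rw [hve]
    have hbig : ¬ (v' * 10 + (e.toNat - 48)) < 10 := by omega
    constructor
    · rw [pvDigs, if_neg hbig]
      have hdiv : (v' * 10 + (e.toNat - 48)) / 10 = v' := by omega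
      have hmod : (v' * 10 + (e.toNat - 48)) % 10 = e.toNat - 48 := by omega
      rw [hdiv, hmod, hds, pvDigitChar_of_toNat e hee.1 hee.2]
    · omega

theorem pvSuffixIndex_some (t : List Char) (n : Nat) (h : pvSuffixIndex t = some n) :
    t = pvDigs n ∧ 1 ≤ n := by
  match t with
  | [] => exact absurd h (by simp [pvSuffixIndex])
  | c :: cs =>
    simp only [pvSuffixIndex] at h
    split at h
    · cases h
    · obtain ⟨hdig, hval⟩ := pvParseLoop_some _ _ _ h
      obtain ⟨hds, hge⟩ := pvDigs_val cs c hdig (by assumption)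
      subst hval
      exact ⟨hds.symm, hge⟩

-- which keys mark index n as taken
def pvMatches (listenPath key : String) (n : Nat) : Prop :=
  PySem.Str.startswith key listenPath = true ∧
    ((key.toList.drop listenPath.toList.length = [] ∧ n = 0) ∨
      pvSuffixIndex (key.toList.drop listenPath.toList.length) = some n)

theorem pvMem_addKey (listenPath key : String) (s : PySem.Set Nat) (n : Nat) :
    n ∈ pvAddKey listenPath s key ↔ n ∈ s ∨ pvMatches listenPath key n := by
  unfold pvAddKey pvMatches
  by_cases hsw : PySem.Str.startswith key listenPath = true
  · rw [if_pos hsw]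
    by_cases hnil : key.toList.drop listenPath.toList.length = []
    · rw [if_pos hnil, PySem.Set.mem_add]
      constructor
      · rintro (h | rfl)
        · exact Or.inl h
        · exact Or.inr ⟨hsw, Or.inl ⟨hnil, rfl⟩⟩
      · rintro (h | ⟨_, (⟨_, rfl⟩ | hsi)⟩)
        · exact Or.inl h
        · exact Or.inr rfl
        · rw [hnil] at hsi
          exact absurd hsi (by simp [pvSuffixIndex])
    · rw [if_neg hnil]
      cases hsi : pvSuffixIndex (key.toList.drop listenPath.toList.length) with
      | none =>
        constructor
        · intro h
          exact Or.inl h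
        · rintro (h | ⟨_, (⟨hnil', _⟩ | hsi')⟩)
          · exact h
          · exact absurd hnil' hnil
          · cases hsi'
      | some m =>
        rw [PySem.Set.mem_add]
        constructor
        · rintro (h | rfl)
          · exact Or.inl h
          · exact Or.inr ⟨hsw, Or.inr rfl⟩
        · rintro (h | ⟨_, (⟨hnil', _⟩ | hsi')⟩)
          · exact Or.inl h
          · exact absurd hnil' hnil
          · exact Or.inr (Option.some_inj.mp hsi').symm
  · rw [if_neg hsw]
    constructor
    · intro h
      exact Or.inl h
    · rintro (h | ⟨hsw', _⟩)
      · exact h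
      · exact absurd hsw' hsw

theorem pvMem_taken (listenPath : String) (allListenPaths : List (String × Int)) (n : Nat) :
    n ∈ pvTaken listenPath allListenPaths ↔
      ∃ kv ∈ allListenPaths, pvMatches listenPath kv.1 n := by
  have gen : ∀ (l : List (String × Int)) (s : PySem.Set Nat),
      n ∈ l.foldl (fun s kv => pvAddKey listenPath s kv.1) s ↔
        n ∈ s ∨ ∃ kv ∈ l, pvMatches listenPath kv.1 n := by
    intro l
    induction l with
    | nil => intro s; simp
    | cons kv l ih =>
      intro s
      simp only [List.foldl_cons, ih, pvMem_addKey, List.mem_cons]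
      constructor
      · rintro ((h | h) | ⟨x, hx, hm⟩)
        · exact Or.inl h
        · exact Or.inr ⟨kv, Or.inl rfl, h⟩
        · exact Or.inr ⟨x, Or.inr hx, hm⟩
      · rintro (h | ⟨x, rfl | hx, hm⟩)
        · exact Or.inl (Or.inl h)
        · exact Or.inl (Or.inr hm)
        · exact Or.inr ⟨x, hx, hm⟩
  rw [pvTaken, gen]
  simp [PySem.Set.empty]

theorem pvCand_toList (listenPath : String) (n : Nat) (hn : 1 ≤ n) :
    (pvCand listenPath n).toList = listenPath.toList ++ pvDigs n := by
  rw [pvCand, if_neg (by omega)]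
  rw [String.toList_append, PySem.Int.toList_toStr, pvToChars_natCast]

theorem pvMatches_iff (listenPath key : String) (n : Nat) :
    pvMatches listenPath key n ↔ key = pvCand listenPath n := by
  constructor
  · rintro ⟨hsw, h⟩
    have hpre : listenPath.toList <+: key.toList := by
      rw [PySem.Str.startswith_eq] at hsw
      exact (PySem.Chars.startswith_iff _ _).mp hsw
    obtain ⟨t, ht⟩ := hpre
    have hdrop : key.toList.drop listenPath.toList.length = t := by
      rw [← ht, List.drop_left]
    rcases h with ⟨hnil, hn0⟩ | hsi
    · subst hn0
      rw [hdrop] at hnil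
      subst hnil
      rw [← String.toList_inj, pvCand, if_pos rfl, ← ht]
      simp
    · rw [hdrop] at hsi
      obtain ⟨htd, hge⟩ := pvSuffixIndex_some t n hsi
      rw [← String.toList_inj, pvCand_toList listenPath n hge, ← ht, htd]
  · intro hk
    subst hk
    by_cases hn : n = 0
    · subst hn
      have hc0 : pvCand listenPath 0 = listenPath := by rw [pvCand, if_pos rfl]
      rw [hc0]
      refine ⟨?_, Or.inl ⟨?_, rfl⟩⟩
      · rw [PySem.Str.startswith_eq, PySem.Chars.startswith_iff]
      · simp
    · have hge : 1 ≤ n := by omega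
      have htl := pvCand_toList listenPath n hge
      refine ⟨?_, Or.inr ?_⟩
      · rw [PySem.Str.startswith_eq, PySem.Chars.startswith_iff, htl]
        exact ⟨pvDigs n, rfl⟩
      · rw [htl, List.drop_left]
        exact pvSuffixIndex_digs n hge

theorem pvContains_taken (listenPath : String) (allListenPaths : List (String × Int)) (n : Nat) :
    PySem.Set.contains (pvTaken listenPath allListenPaths) n =
      pvMemKey allListenPaths (pvCand listenPath n) := by
  have hiff : PySem.Set.contains (pvTaken listenPath allListenPaths) n = true ↔
      pvMemKey allListenPaths (pvCand listenPath n) = true := by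
    rw [PySem.Set.contains_iff, pvMem_taken, pvMemKey, List.any_eq_true]
    constructor
    · rintro ⟨kv, hkv, hm⟩
      exact ⟨kv, hkv, by rw [beq_iff_eq]; exact (pvMatches_iff _ _ _).mp hm⟩
    · rintro ⟨kv, hkv, hb⟩
      rw [beq_iff_eq] at hb
      exact ⟨kv, hkv, (pvMatches_iff _ _ _).mpr hb⟩
  rw [Bool.eq_iff_iff]
  exact hiff

theorem pvLoopA_eq_mex (listenPath : String) (allListenPaths : List (String × Int)) :
    ∀ (fuel i : Nat), 1 ≤ i →
      pvLoopA listenPath allListenPaths i fuel =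
        pvCand listenPath (pvMex (pvTaken listenPath allListenPaths) i fuel) := by
  intro fuel
  induction fuel with
  | zero =>
    intro i hi
    show listenPath ++ PySem.Int.toStr i = pvCand listenPath i
    rw [pvCand, if_neg (by omega)]
  | succ f ih =>
    intro i hi
    show (if pvMemKey allListenPaths (listenPath ++ PySem.Int.toStr i) = true then
            pvLoopA listenPath allListenPaths (i + 1) f
          else listenPath ++ PySem.Int.toStr i) =
      pvCand listenPath
        (if PySem.Set.contains (pvTaken listenPath allListenPaths) i = true then
          pvMex (pvTaken listenPath allListenPaths) (i + 1) f
        else i)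
    have hcand : listenPath ++ PySem.Int.toStr (i : Int) = pvCand listenPath i := by
      rw [pvCand, if_neg (by omega)]
    rw [pvContains_taken, ← hcand]
    by_cases hm : pvMemKey allListenPaths (listenPath ++ PySem.Int.toStr (i : Int)) = true
    · rw [if_pos hm, if_pos hm]
      exact ih (i + 1) (by omega)
    · rw [if_neg hm, if_neg hm]
      exact hcand

-- ===== VERDICT (by name: the statement is the Claim_ definition above) =====
theorem getNewListenPath_spec : Claim_equal_getNewListenPath := by
  intro listenPath allListenPaths _
  unfold Spec_getNewListenPath getNewListenPath getNewListenPath_alt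
  show (if pvMemKey allListenPaths listenPath = true then
          pvLoopA listenPath allListenPaths 1 (allListenPaths.length + 1)
        else listenPath) =
    pvCand listenPath (pvMex (pvTaken listenPath allListenPaths) 0 (allListenPaths.length + 2))
  have hstep : pvMex (pvTaken listenPath allListenPaths) 0 (allListenPaths.length + 2) =
      if PySem.Set.contains (pvTaken listenPath allListenPaths) 0 = true then
        pvMex (pvTaken listenPath allListenPaths) 1 (allListenPaths.length + 1)
      else 0 := rfl
  have hc0 : PySem.Set.contains (pvTaken listenPath allListenPaths) 0 =
      pvMemKey allListenPaths listenPath := by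
    rw [pvContains_taken]
    rfl
  rw [hstep, hc0]
  by_cases h : pvMemKey allListenPaths listenPath = true
  · rw [if_pos h, if_pos h]
    exact pvLoopA_eq_mex listenPath allListenPaths (allListenPaths.length + 1) 1 (by omega)
  · rw [if_neg h, if_neg h]
    rfl
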